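-- pv_equiv track=rewrite | github.com/ChanneyWood/sn_model | code/utils.py | change_graph_to_acc
-- ===== SOURCE A (Python) =====
-- import copy
--
-- def change_graph_to_acc(slice_data):
--     new_slice = []
--     acc_data = []
--     for one_slice in slice_data:
--         acc_data.extend(one_slice)
--         append_data = copy.deepcopy(acc_data)
--         new_slice.append(append_data)
--     return new_slice
-- ===== SOURCE B (Python) =====
-- import copy
--
-- def change_graph_to_acc(slice_data):
--     data = list(slice_data)
--     return [copy.deepcopy([e for s in data[:i + 1] for e in s])
--             for i in range(len(data))]
-- ===== Notes on version B (the rewrite author's own statement) =====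
-- stated objective: alternative
-- what changed: Replaces the single forward pass with a running accumulator by an index-driven comprehension that rebuilds each cumulative prefix from scratch by flattening slice_data[:i+1].
import Mathlib
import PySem

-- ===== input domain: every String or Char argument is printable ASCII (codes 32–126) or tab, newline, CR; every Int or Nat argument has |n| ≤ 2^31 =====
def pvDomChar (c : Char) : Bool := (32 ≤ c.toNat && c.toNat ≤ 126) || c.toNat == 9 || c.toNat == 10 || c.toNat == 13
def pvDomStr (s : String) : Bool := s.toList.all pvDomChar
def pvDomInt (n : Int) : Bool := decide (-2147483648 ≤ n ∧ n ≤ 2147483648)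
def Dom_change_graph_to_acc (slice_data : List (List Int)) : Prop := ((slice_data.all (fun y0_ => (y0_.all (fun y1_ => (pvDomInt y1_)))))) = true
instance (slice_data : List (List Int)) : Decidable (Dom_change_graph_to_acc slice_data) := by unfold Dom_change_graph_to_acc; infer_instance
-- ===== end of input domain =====

-- ===== PORT A =====
-- literal port of A: one foldl carrying (new_slice, acc_data); acc_data.extend → acc ++ one_slice,
-- copy.deepcopy on a list of ints copies to an equal value, so the port appends acc itself
def change_graph_to_acc (slice_data : List (List Int)) : List (List Int) :=
  (slice_data.foldl
    (fun (st : List (List Int) × List Int) one_slice =>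
      let acc := st.2 ++ one_slice
      (st.1 ++ [acc], acc))
    ([], [])).1

-- ===== PORT B =====
-- port of B: for each index i, flatten data[:i+1] from scratch (deepcopy is value-identity on ints)
def change_graph_to_acc_alt (slice_data : List (List Int)) : List (List Int) :=
  (List.range slice_data.length).map
    (fun i => (slice_data.take (i + 1)).flatMap id)

-- ===== PRECONDITION & SPEC =====
def Spec_change_graph_to_acc (slice_data : List (List Int)) (out : List (List Int)) : Prop := out = change_graph_to_acc_alt slice_data
instance (slice_data : List (List Int)) (out : List (List Int)) : Decidable (Spec_change_graph_to_acc slice_data out) := by unfold Spec_change_graph_to_acc; infer_instance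

-- ===== CLAIM (what is proved, stated in full; the proofs are below) =====
def Claim_equal_change_graph_to_acc : Prop := ∀ (slice_data : List (List Int)), Dom_change_graph_to_acc slice_data → Spec_change_graph_to_acc slice_data (change_graph_to_acc slice_data)

-- ===== LEMMAS AND PROOFS =====

-- ===== VERDICT (by name: the statement is the Claim_ definition above) =====
-- loop invariant: the fold from (out, acc) produces out ++ the prefix-flattens each prepended with acc
theorem fold_prefixes (xs : List (List Int)) (out : List (List Int)) (acc : List Int) :
    (xs.foldl
      (fun (st : List (List Int) × List Int) one_slice =>
        let a := st.2 ++ one_slice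
        (st.1 ++ [a], a))
      (out, acc)).1
    = out ++ (List.range xs.length).map (fun i => acc ++ (xs.take (i + 1)).flatMap id) := by
  induction xs generalizing out acc with
  | nil => simp
  | cons x xs ih =>
    simp only [List.foldl_cons]
    rw [ih]
    simp [List.length_cons, List.range_succ_eq_map, List.map_map, Function.comp,
      List.append_assoc]

theorem change_graph_to_acc_spec : Claim_equal_change_graph_to_acc := by
  intro slice_data _
  unfold Spec_change_graph_to_acc change_graph_to_acc change_graph_to_acc_alt
  rw [fold_prefixes]
  simp
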